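-- pv_equiv track=rewrite | github.com/DehAraujo/simulacao-testes-software | mutants/operacoes.py | x_media__mutmut_16
-- ===== SOURCE A (Python) =====
-- def x_media__mutmut_16(numeros):
--     soma = 0
--
--     if numeros == []:
--         raise ValueError("Lista vazia")
--
--     for n in numeros:
--         if n < 0:
--             raise ValueError("Valor inválido")
--
--         soma += n
--
--     return soma * len(numeros)
-- ===== SOURCE B (Python) =====
-- def _agg(xs):
--     # divide-and-conquer aggregation of (sum, length)
--     if len(xs) <= 1:
--         return (xs[0], 1) if xs else (0, 0)
--     mid = len(xs) // 2
--     s1, c1 = _agg(xs[:mid])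
--     s2, c2 = _agg(xs[mid:])
--     return (s1 + s2, c1 + c2)
--
--
-- def x_media__mutmut_16(numeros):
--     if not numeros:
--         raise ValueError("Lista vazia")
--     if min(numeros) < 0:
--         raise ValueError("Valor inválido")
--     soma, tamanho = _agg(numeros)
--     return soma * tamanho
-- ===== Notes on version B (the rewrite author's own statement) =====
-- stated objective: alternative
-- what changed: Replaces A's single fused validate-and-accumulate loop with a min()-based validation pass followed by a recursive divide-and-conquer aggregation that computes (sum, length) by splitting the list in half; identical values and exceptions.
import Mathlib
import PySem

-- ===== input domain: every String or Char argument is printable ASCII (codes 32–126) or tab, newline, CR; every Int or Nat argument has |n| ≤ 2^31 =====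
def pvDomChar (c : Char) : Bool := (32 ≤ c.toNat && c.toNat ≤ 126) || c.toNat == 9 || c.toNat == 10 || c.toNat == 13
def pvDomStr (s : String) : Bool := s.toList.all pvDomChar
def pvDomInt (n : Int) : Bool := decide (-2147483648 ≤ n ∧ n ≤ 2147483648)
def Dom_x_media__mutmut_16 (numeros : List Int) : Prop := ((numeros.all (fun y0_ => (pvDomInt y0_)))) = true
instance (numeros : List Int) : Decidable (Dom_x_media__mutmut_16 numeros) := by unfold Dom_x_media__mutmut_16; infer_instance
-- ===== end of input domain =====

-- B replaces A's fused validate-and-accumulate loop by a min()-based validation pass plus a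
-- recursive divide-and-conquer (sum, length) aggregation; objective: alternative decomposition,
-- same values and exceptions.

-- ===== PORT A =====
-- A's for-loop: accumulate soma, signalling (none) on the first negative element (the raise).
def xMediaLoopA : List Int → Int → Option Int
  | [], soma => some soma
  | n :: rest, soma => if n < 0 then none else xMediaLoopA rest (soma + n)

def x_media__mutmut_16 (numeros : List Int) : Int :=
  if numeros = [] then 0  -- raise ValueError "Lista vazia" (excluded by Pre_)
  else match xMediaLoopA numeros 0 with
    | none => 0           -- raise ValueError "Valor inválido" (excluded by Pre_)
    | some soma => soma * numeros.length

-- ===== PORT B =====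
-- Source B's _agg: divide-and-conquer (sum, length); xs[:mid]/xs[mid:] with 0 ≤ mid ≤ len(xs)
-- are exactly List.take mid / List.drop mid.
def xMediaAggB (xs : List Int) : Int × Int :=
  if h : xs.length ≤ 1 then
    match xs with
    | x :: _ => (x, 1)
    | [] => (0, 0)
  else
    let mid := xs.length / 2
    let p1 := xMediaAggB (xs.take mid)
    let p2 := xMediaAggB (xs.drop mid)
    (p1.1 + p2.1, p1.2 + p2.2)
termination_by xs.length
decreasing_by
  · simp only [List.length_take]; omega
  · simp only [List.length_drop]; omega

def x_media__mutmut_16_alt (numeros : List Int) : Int :=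
  if numeros = [] then 0  -- raise ValueError "Lista vazia" (excluded by Pre_)
  else if (PySem.List.min? numeros (fun x => x)).getD 0 < 0 then 0  -- raise ValueError "Valor inválido" (excluded by Pre_)
  else
    let p := xMediaAggB numeros
    p.1 * p.2

-- ===== PRECONDITION & SPEC =====
-- Pre_ excludes exactly the inputs on which A (and B) raise ValueError: the empty list and lists containing a negative element.
def Pre_x_media__mutmut_16 (numeros : List Int) : Prop := numeros ≠ [] ∧ ∀ n ∈ numeros, 0 ≤ n
instance (numeros : List Int) : Decidable (Pre_x_media__mutmut_16 numeros) := by unfold Pre_x_media__mutmut_16; infer_instance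
def pvWitness_x_media__mutmut_16 : List Int := [1, 2, 3]

def Spec_x_media__mutmut_16 (numeros : List Int) (out : Int) : Prop := out = x_media__mutmut_16_alt numeros
instance (numeros : List Int) (out : Int) : Decidable (Spec_x_media__mutmut_16 numeros out) := by unfold Spec_x_media__mutmut_16; infer_instance

-- ===== CLAIM (what is proved, stated in full; the proofs are below) =====
def Claim_equal_x_media__mutmut_16 : Prop := ∀ (numeros : List Int), Dom_x_media__mutmut_16 numeros → Pre_x_media__mutmut_16 numeros → Spec_x_media__mutmut_16 numeros (x_media__mutmut_16 numeros)

-- ===== LEMMAS AND PROOFS =====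
theorem xMediaLoopA_nonneg (numeros : List Int) (soma : Int)
    (h : ∀ n ∈ numeros, 0 ≤ n) : xMediaLoopA numeros soma = some (soma + numeros.sum) := by
  induction numeros generalizing soma with
  | nil => simp [xMediaLoopA]
  | cons n rest ih =>
    have hn : 0 ≤ n := h n (List.mem_cons_self ..)
    rw [xMediaLoopA, if_neg (by omega), ih (soma + n) (fun m hm => h m (List.mem_cons_of_mem _ hm))]
    simp only [List.sum_cons, Option.some.injEq]
    ring

theorem xMediaAggB_eq (xs : List Int) : xMediaAggB xs = (xs.sum, (xs.length : Int)) := by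
  rw [xMediaAggB]
  split
  case isTrue h =>
    match xs, h with
    | [], _ => simp
    | [x], _ => simp
  case isFalse h =>
    simp only [xMediaAggB_eq (xs.take (xs.length / 2)), xMediaAggB_eq (xs.drop (xs.length / 2))]
    have hsplit : xs.take (xs.length / 2) ++ xs.drop (xs.length / 2) = xs :=
      List.take_append_drop _ xs
    have hs : (xs.take (xs.length / 2)).sum + (xs.drop (xs.length / 2)).sum = xs.sum := by
      rw [← List.sum_append, hsplit]
    have hl : (xs.take (xs.length / 2)).length + (xs.drop (xs.length / 2)).length = xs.length := by
      rw [← List.length_append, hsplit]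
    rw [Prod.mk.injEq]
    exact ⟨hs, by omega⟩
termination_by xs.length
decreasing_by
  · simp only [List.length_take]; omega
  · simp only [List.length_drop]; omega

-- ===== VERDICT (by name: the statement is the Claim_ definition above) =====
theorem x_media__mutmut_16_spec : Claim_equal_x_media__mutmut_16 := by
  intro numeros _ ⟨hne, hnn⟩
  unfold Spec_x_media__mutmut_16 x_media__mutmut_16 x_media__mutmut_16_alt
  rw [if_neg hne, if_neg hne, xMediaLoopA_nonneg numeros 0 hnn]
  have hmin : ¬ (PySem.List.min? numeros (fun x => x)).getD 0 < 0 := by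
    cases hm : PySem.List.min? numeros (fun x => x) with
    | none => simp
    | some m =>
      have := PySem.List.min?_mem hm
      simpa using not_lt.mpr (hnn m this)
  rw [if_neg hmin, xMediaAggB_eq]
  simp
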